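-- pv_equiv track=rewrite | github.com/bmbell23/stephen-king-parser | old/parse_king_works-V1.3.1.py | process_formats
-- ===== SOURCE A (Python) =====
-- from typing import Dict, List, Tuple, Optional
--
-- def process_formats(formats_str: str) -> Dict[str, str]:
--     """
--     Process formats string into a dictionary of format availability.
--
--     Args:
--         formats_str (str): Comma-separated string of formats
--
--     Returns:
--         Dict[str, str]: Dictionary with format types as keys and '✓' or '' as values
--     """
--     formats_dict = {
--         'Hardcover': '',
--         'Paperback': '',
--         'Ebook': '',
--         'Audiobook': '',
--         'Movie': '',
--         'Miniseries': ''
--     }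
--
--     if not formats_str:
--         return formats_dict
--
--     format_list = formats_str.split(',')
--     for fmt in format_list:
--         fmt = fmt.strip()
--         if 'Hardcover' in fmt:
--             formats_dict['Hardcover'] = '✓'
--         if 'Paperback' in fmt:
--             formats_dict['Paperback'] = '✓'
--         if 'Kindle' in fmt or 'eBook' in fmt:
--             formats_dict['Ebook'] = '✓'
--         if 'Audio' in fmt or 'Audiobook' in fmt:
--             formats_dict['Audiobook'] = '✓'
--         if 'Movie' in fmt:
--             formats_dict['Movie'] = '✓'
--         if 'TV' in fmt or 'Miniseries' in fmt:
--             formats_dict['Miniseries'] = '✓'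
--
--     return formats_dict
-- ===== SOURCE B (Python) =====
-- def process_formats(formats_str: str) -> dict:
--     """Build the availability dict by testing each keyword group against the
--     whole string: keywords contain no comma and no whitespace, so matching the
--     full string is equivalent to matching any stripped comma-token."""
--     table = [
--         ('Hardcover', ('Hardcover',)),
--         ('Paperback', ('Paperback',)),
--         ('Ebook', ('Kindle', 'eBook')),
--         ('Audiobook', ('Audio',)),
--         ('Movie', ('Movie',)),
--         ('Miniseries', ('TV', 'Miniseries')),
--     ]
--     return {key: '✓' if any(sub in formats_str for sub in subs) else ''
--             for key, subs in table}
-- ===== Notes on version B (the rewrite author's own statement) =====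
-- stated objective: simpler
-- what changed: Removed the comma-split/strip token loop and the mutable dict entirely: B builds the result in one comprehension over a key->keywords table, testing each keyword against the whole string (valid since keywords contain no comma and no whitespace, and 'Audiobook' is subsumed by 'Audio').
import Mathlib
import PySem

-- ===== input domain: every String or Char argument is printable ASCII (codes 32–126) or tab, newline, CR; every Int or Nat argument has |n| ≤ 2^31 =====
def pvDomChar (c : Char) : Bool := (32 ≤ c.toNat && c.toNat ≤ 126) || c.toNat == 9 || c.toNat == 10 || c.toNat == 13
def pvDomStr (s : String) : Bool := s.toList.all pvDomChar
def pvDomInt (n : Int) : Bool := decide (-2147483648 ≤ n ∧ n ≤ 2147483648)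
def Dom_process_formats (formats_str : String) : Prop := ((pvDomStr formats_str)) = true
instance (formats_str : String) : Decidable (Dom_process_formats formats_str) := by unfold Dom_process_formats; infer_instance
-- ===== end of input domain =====

-- B replaces A's comma-split/strip token loop and mutable dict by a single comprehension over a
-- key → keywords table tested against the whole string (simpler; keywords contain no comma and
-- no whitespace, so whole-string membership is equivalent).

-- ===== PORT A =====
def process_formats (formats_str : String) : List (String × String) :=
  let formats_dict : PySem.Dict String String := PySem.Dict.ofList
    [("Hardcover", ""), ("Paperback", ""), ("Ebook", ""),
     ("Audiobook", ""), ("Movie", ""), ("Miniseries", "")]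
  if formats_str = "" then formats_dict.items
  else
    let format_list := (PySem.Str.split? formats_str ",").getD []
    let d := format_list.foldl (fun d fmt0 =>
      let fmt := PySem.Str.strip fmt0
      let d := if PySem.Str.isIn "Hardcover" fmt then d.insert "Hardcover" "✓" else d
      let d := if PySem.Str.isIn "Paperback" fmt then d.insert "Paperback" "✓" else d
      let d := if PySem.Str.isIn "Kindle" fmt || PySem.Str.isIn "eBook" fmt then d.insert "Ebook" "✓" else d
      let d := if PySem.Str.isIn "Audio" fmt || PySem.Str.isIn "Audiobook" fmt then d.insert "Audiobook" "✓" else d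
      let d := if PySem.Str.isIn "Movie" fmt then d.insert "Movie" "✓" else d
      let d := if PySem.Str.isIn "TV" fmt || PySem.Str.isIn "Miniseries" fmt then d.insert "Miniseries" "✓" else d
      d) formats_dict
    d.items

-- ===== PORT B =====
def process_formats_alt (formats_str : String) : List (String × String) :=
  [("Hardcover", ["Hardcover"]), ("Paperback", ["Paperback"]), ("Ebook", ["Kindle", "eBook"]),
   ("Audiobook", ["Audio"]), ("Movie", ["Movie"]), ("Miniseries", ["TV", "Miniseries"])].map
    (fun p => (p.1, if p.2.any (fun sub => PySem.Str.isIn sub formats_str) then "✓" else ""))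

-- ===== PRECONDITION & SPEC =====
def Spec_process_formats (formats_str : String) (out : List (String × String)) : Prop := out = process_formats_alt formats_str
instance (formats_str : String) (out : List (String × String)) : Decidable (Spec_process_formats formats_str out) := by unfold Spec_process_formats; infer_instance

-- ===== CLAIM (what is proved, stated in full; the proofs are below) =====
def Claim_equal_process_formats : Prop := ∀ (formats_str : String), Dom_process_formats formats_str → Spec_process_formats formats_str (process_formats formats_str)

-- ===== LEMMAS AND PROOFS =====
def mySplit (c : Char) : List Char → List Char → List (List Char)
  | [], cur => [cur.reverse]
  | x :: rest, cur => if x = c then cur.reverse :: mySplit c rest [] else mySplit c rest (x :: cur)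

lemma go_eq (c : Char) : ∀ (fuel : Nat) (l cur acc : List Char), ∀ (accs : List (List Char)),
    l.length < fuel → PySem.Chars.splitOn.go [c] fuel l cur accs = accs.reverse ++ mySplit c l cur := by
  intro fuel
  induction fuel with
  | zero => intro l cur acc accs h; omega
  | succ n ih =>
    intro l cur _ accs h
    cases l with
    | nil => simp [PySem.Chars.splitOn.go, mySplit]
    | cons x rest =>
      by_cases hx : x = c
      · subst hx
        rw [show PySem.Chars.splitOn.go [x] (n+1) (x::rest) cur accs
              = PySem.Chars.splitOn.go [x] n rest [] (cur.reverse :: accs) from by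
            simp [PySem.Chars.splitOn.go, List.isPrefixOf]]
        rw [ih rest [] [] (cur.reverse :: accs) (by simpa using Nat.lt_of_succ_lt_succ h)]
        simp [mySplit]
      · rw [show PySem.Chars.splitOn.go [c] (n+1) (x::rest) cur accs
              = PySem.Chars.splitOn.go [c] n rest (x :: cur) accs from by
            simp [PySem.Chars.splitOn.go, List.isPrefixOf, hx, Ne.symm hx]]
        rw [ih rest (x::cur) [] accs (by simpa using Nat.lt_of_succ_lt_succ h)]
        simp [mySplit, hx]

lemma splitOn_eq (c : Char) (s : List Char) : PySem.Chars.splitOn s [c] = mySplit c s [] := by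
  rw [PySem.Chars.splitOn, go_eq c (s.length + 1) s [] [] [] (by omega)]; rfl

-- prefix that avoids a separator char stays in the left part
lemma prefix_of_sep (c : Char) : ∀ (kw a b : List Char), c ∉ kw → kw <+: a ++ c :: b → kw <+: a := by
  intro kw
  induction kw with
  | nil => intro a b _ _; exact List.nil_prefix
  | cons k kw' ih =>
    intro a b hc hp
    cases a with
    | nil =>
      simp at hp
      exact absurd (hp.1 ▸ List.mem_cons_self) hc
    | cons x a' =>
      rw [List.cons_append, List.cons_prefix_cons] at hp
      rw [List.cons_prefix_cons]
      exact ⟨hp.1, ih a' b (fun h => hc (List.mem_cons_of_mem _ h)) hp.2⟩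

lemma infix_sep_split (c : Char) : ∀ (kw a b : List Char), c ∉ kw → kw <:+: a ++ c :: b → kw <:+: a ∨ kw <:+: b := by
  intro kw a
  induction a generalizing kw with
  | nil =>
    intro b hc h
    simp only [List.nil_append] at h
    rcases List.infix_cons_iff.mp h with hp | hi
    · cases kw with
      | nil => exact Or.inl (List.infix_rfl)
      | cons k kw' =>
        rw [List.cons_prefix_cons] at hp
        exact absurd (hp.1 ▸ List.mem_cons_self) hc
    · exact Or.inr hi
  | cons x a' ih =>
    intro b hc h
    rw [List.cons_append] at h
    rcases List.infix_cons_iff.mp h with hp | hi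
    · exact Or.inl (prefix_of_sep c kw (x :: a') b hc (by rwa [List.cons_append])).isInfix
    · rcases ih kw b hc hi with h1 | h2
      · exact Or.inl (h1.trans ⟨[x],[],by simp⟩)
      · exact Or.inr h2

-- an infix all of whose chars violate P passes over a left part all of whose chars satisfy P
lemma infix_right_of_all (P : Char → Bool) : ∀ (w kw m : List Char), (∀ x ∈ w, P x) → (∀ x ∈ kw, P x = false) →
    kw ≠ [] → kw <:+: w ++ m → kw <:+: m := by
  intro w
  induction w with
  | nil => intro kw m _ _ _ h; simpa using h
  | cons x w' ih =>
    intro kw m hw hk hne h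
    rw [List.cons_append] at h
    rcases List.infix_cons_iff.mp h with hp | hi
    · cases kw with
      | nil => exact absurd rfl hne
      | cons k kw' =>
        rw [List.cons_prefix_cons] at hp
        have h1 := hk k List.mem_cons_self
        have h2 := hw x List.mem_cons_self
        rw [hp.1] at h1
        rw [h2] at h1
        exact absurd h1 (by simp)
    · exact ih kw m (fun y hy => hw y (List.mem_cons_of_mem _ hy)) hk hne hi

lemma strip_infix (t : List Char) : PySem.Chars.strip t <:+: t := by
  have h1 : PySem.Chars.rstrip (PySem.Chars.lstrip t) <+: PySem.Chars.lstrip t := by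
    rw [PySem.Chars.rstrip]
    have := List.dropWhile_suffix (l := (PySem.Chars.lstrip t).reverse) PySem.Chars.isspace
    rw [← List.reverse_prefix] at this
    simpa using this
  have h2 : PySem.Chars.lstrip t <:+ t := List.dropWhile_suffix _
  exact h1.isInfix.trans h2.isInfix

lemma infix_strip_of_infix (kw t : List Char) (hne : kw ≠ [])
    (hw : ∀ x ∈ kw, PySem.Chars.isspace x = false) (h : kw <:+: t) : kw <:+: PySem.Chars.strip t := by
  have hl : kw <:+: PySem.Chars.lstrip t := by
    refine infix_right_of_all PySem.Chars.isspace (List.takeWhile PySem.Chars.isspace t) kw _ ?_ hw hne ?_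
    · exact fun x hx => List.mem_takeWhile_imp hx
    · rw [PySem.Chars.lstrip]; rwa [List.takeWhile_append_dropWhile]
  rw [PySem.Chars.strip, PySem.Chars.rstrip]
  rw [← List.reverse_infix]
  rw [List.reverse_reverse]
  refine infix_right_of_all PySem.Chars.isspace (List.takeWhile PySem.Chars.isspace (PySem.Chars.lstrip t).reverse) kw.reverse _ ?_ ?_ (by simpa using hne) ?_
  · exact fun x hx => List.mem_takeWhile_imp hx
  · intro x hx; exact hw x (List.mem_reverse.mp hx)
  · rw [List.takeWhile_append_dropWhile]
    rwa [List.reverse_infix]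

lemma mem_mySplit_infix (c : Char) : ∀ (l cur t : List Char), t ∈ mySplit c l cur → t <:+: cur.reverse ++ l := by
  intro l
  induction l with
  | nil => intro cur t ht; simp [mySplit] at ht; simp [ht]
  | cons x rest ih =>
    intro cur t ht
    rw [mySplit] at ht
    by_cases hx : x = c
    · rw [if_pos hx] at ht
      rcases List.mem_cons.mp ht with h | h
      · exact h ▸ (List.prefix_append _ _).isInfix
      · have := ih [] t h
        simp at this
        exact this.trans ((List.suffix_append_of_suffix (List.suffix_cons x rest)).isInfix)
    · rw [if_neg hx] at ht
      have := ih (x :: cur) t ht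
      simpa using this

lemma mySplit_complete (c : Char) : ∀ (l cur kw : List Char), c ∉ kw →
    kw <:+: cur.reverse ++ l → ∃ t ∈ mySplit c l cur, kw <:+: t := by
  intro l
  induction l with
  | nil => intro cur kw _ h; exact ⟨cur.reverse, by simp [mySplit], by simpa using h⟩
  | cons x rest ih =>
    intro cur kw hc h
    rw [mySplit]
    by_cases hx : x = c
    · rw [if_pos hx]
      subst hx
      rcases infix_sep_split x kw cur.reverse rest hc h with h1 | h2
      · exact ⟨cur.reverse, List.mem_cons_self, h1⟩
      · rcases ih [] kw hc (by simpa using h2) with ⟨t, ht, hkt⟩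
        exact ⟨t, List.mem_cons_of_mem _ ht, hkt⟩
    · rw [if_neg hx]
      exact ih (x :: cur) kw hc (by simpa using h)

-- MAIN
lemma key_lemma (kw s : List Char) (hne : kw ≠ []) (hc : (',' : Char) ∉ kw)
    (hw : ∀ x ∈ kw, PySem.Chars.isspace x = false) :
    (PySem.Chars.splitOn s [',']).any (fun t => PySem.Chars.isIn kw (PySem.Chars.strip t))
      = PySem.Chars.isIn kw s := by
  rw [splitOn_eq]
  cases hs : PySem.Chars.isIn kw s with
  | true =>
    rw [PySem.Chars.isIn_iff_infix] at hs
    rcases mySplit_complete ',' s [] kw hc (by simpa using hs) with ⟨t, ht, hkt⟩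
    rw [List.any_eq_true]
    exact ⟨t, ht, (PySem.Chars.isIn_iff_infix _ _).mpr (infix_strip_of_infix kw t hne hw hkt)⟩
  | false =>
    rw [List.any_eq_false]
    intro t ht
    rw [Bool.not_eq_true, PySem.Chars.isIn_eq_false_iff]
    intro hinf
    have h1 : kw <:+: t := hinf.trans (strip_infix t)
    have h2 := (mem_mySplit_infix ',' s [] t ht)
    simp only [List.reverse_nil, List.nil_append] at h2
    have := (PySem.Chars.isIn_iff_infix kw s).mpr (h1.trans h2)
    rw [hs] at this
    exact absurd this (by simp)

def pvV (b : Bool) : String := if b then "✓" else ""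

def pvD (b1 b2 b3 b4 b5 b6 : Bool) : PySem.Dict String String :=
  PySem.Dict.mk [("Hardcover", pvV b1), ("Paperback", pvV b2), ("Ebook", pvV b3),
                 ("Audiobook", pvV b4), ("Movie", pvV b5), ("Miniseries", pvV b6)]

def pvStep (d : PySem.Dict String String) (fmt0 : String) : PySem.Dict String String :=
  let fmt := PySem.Str.strip fmt0
  let d := if PySem.Str.isIn "Hardcover" fmt then d.insert "Hardcover" "✓" else d
  let d := if PySem.Str.isIn "Paperback" fmt then d.insert "Paperback" "✓" else d
  let d := if PySem.Str.isIn "Kindle" fmt || PySem.Str.isIn "eBook" fmt then d.insert "Ebook" "✓" else d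
  let d := if PySem.Str.isIn "Audio" fmt || PySem.Str.isIn "Audiobook" fmt then d.insert "Audiobook" "✓" else d
  let d := if PySem.Str.isIn "Movie" fmt then d.insert "Movie" "✓" else d
  let d := if PySem.Str.isIn "TV" fmt || PySem.Str.isIn "Miniseries" fmt then d.insert "Miniseries" "✓" else d
  d

lemma pvStep_eq (fmt0 : String) (b1 b2 b3 b4 b5 b6 : Bool) :
    pvStep (pvD b1 b2 b3 b4 b5 b6) fmt0 =
      pvD (b1 || PySem.Str.isIn "Hardcover" (PySem.Str.strip fmt0))
          (b2 || PySem.Str.isIn "Paperback" (PySem.Str.strip fmt0))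
          (b3 || (PySem.Str.isIn "Kindle" (PySem.Str.strip fmt0) || PySem.Str.isIn "eBook" (PySem.Str.strip fmt0)))
          (b4 || (PySem.Str.isIn "Audio" (PySem.Str.strip fmt0) || PySem.Str.isIn "Audiobook" (PySem.Str.strip fmt0)))
          (b5 || PySem.Str.isIn "Movie" (PySem.Str.strip fmt0))
          (b6 || (PySem.Str.isIn "TV" (PySem.Str.strip fmt0) || PySem.Str.isIn "Miniseries" (PySem.Str.strip fmt0))) := by
  rw [pvStep]
  cases h1 : PySem.Str.isIn "Hardcover" (PySem.Str.strip fmt0) <;>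
  cases h2 : PySem.Str.isIn "Paperback" (PySem.Str.strip fmt0) <;>
  cases h3 : (PySem.Str.isIn "Kindle" (PySem.Str.strip fmt0) || PySem.Str.isIn "eBook" (PySem.Str.strip fmt0)) <;>
  cases h4 : (PySem.Str.isIn "Audio" (PySem.Str.strip fmt0) || PySem.Str.isIn "Audiobook" (PySem.Str.strip fmt0)) <;>
  cases h5 : PySem.Str.isIn "Movie" (PySem.Str.strip fmt0) <;>
  cases h6 : (PySem.Str.isIn "TV" (PySem.Str.strip fmt0) || PySem.Str.isIn "Miniseries" (PySem.Str.strip fmt0)) <;>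
  simp only [h1, h2, h3, h4, h5, h6, if_true, if_false, Bool.or_true, Bool.or_false,
    Bool.false_or, Bool.true_or] <;> rfl

lemma fold_eq (l : List String) : ∀ (b1 b2 b3 b4 b5 b6 : Bool),
    l.foldl pvStep (pvD b1 b2 b3 b4 b5 b6) =
      pvD (b1 || l.any (fun t => PySem.Str.isIn "Hardcover" (PySem.Str.strip t)))
          (b2 || l.any (fun t => PySem.Str.isIn "Paperback" (PySem.Str.strip t)))
          (b3 || l.any (fun t => PySem.Str.isIn "Kindle" (PySem.Str.strip t) || PySem.Str.isIn "eBook" (PySem.Str.strip t)))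
          (b4 || l.any (fun t => PySem.Str.isIn "Audio" (PySem.Str.strip t) || PySem.Str.isIn "Audiobook" (PySem.Str.strip t)))
          (b5 || l.any (fun t => PySem.Str.isIn "Movie" (PySem.Str.strip t)))
          (b6 || l.any (fun t => PySem.Str.isIn "TV" (PySem.Str.strip t) || PySem.Str.isIn "Miniseries" (PySem.Str.strip t))) := by
  induction l with
  | nil => intro b1 b2 b3 b4 b5 b6; simp
  | cons x xs ih =>
    intro b1 b2 b3 b4 b5 b6
    rw [List.foldl_cons, pvStep_eq, ih]
    simp [List.any_cons, Bool.or_assoc]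

-- the A-side foldl lambda IS pvStep
lemma process_formats_ne (s : String) (h : ¬ s = "") :
    process_formats s =
      (pvD (((PySem.Str.split? s ",").getD []).any (fun t => PySem.Str.isIn "Hardcover" (PySem.Str.strip t)))
           (((PySem.Str.split? s ",").getD []).any (fun t => PySem.Str.isIn "Paperback" (PySem.Str.strip t)))
           (((PySem.Str.split? s ",").getD []).any (fun t => PySem.Str.isIn "Kindle" (PySem.Str.strip t) || PySem.Str.isIn "eBook" (PySem.Str.strip t)))
           (((PySem.Str.split? s ",").getD []).any (fun t => PySem.Str.isIn "Audio" (PySem.Str.strip t) || PySem.Str.isIn "Audiobook" (PySem.Str.strip t)))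
           (((PySem.Str.split? s ",").getD []).any (fun t => PySem.Str.isIn "Movie" (PySem.Str.strip t)))
           (((PySem.Str.split? s ",").getD []).any (fun t => PySem.Str.isIn "TV" (PySem.Str.strip t) || PySem.Str.isIn "Miniseries" (PySem.Str.strip t)))).items := by
  rw [process_formats]
  simp only [if_neg h]
  have hinit : PySem.Dict.ofList
      [("Hardcover", ""), ("Paperback", ""), ("Ebook", ""),
       ("Audiobook", ""), ("Movie", ""), ("Miniseries", "")] = pvD false false false false false false := by decide
  rw [hinit]
  rw [show ((PySem.Str.split? s ",").getD []).foldl (fun d fmt0 =>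
      let fmt := PySem.Str.strip fmt0
      let d := if PySem.Str.isIn "Hardcover" fmt then d.insert "Hardcover" "✓" else d
      let d := if PySem.Str.isIn "Paperback" fmt then d.insert "Paperback" "✓" else d
      let d := if PySem.Str.isIn "Kindle" fmt || PySem.Str.isIn "eBook" fmt then d.insert "Ebook" "✓" else d
      let d := if PySem.Str.isIn "Audio" fmt || PySem.Str.isIn "Audiobook" fmt then d.insert "Audiobook" "✓" else d
      let d := if PySem.Str.isIn "Movie" fmt then d.insert "Movie" "✓" else d
      let d := if PySem.Str.isIn "TV" fmt || PySem.Str.isIn "Miniseries" fmt then d.insert "Miniseries" "✓" else d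
      d) (pvD false false false false false false)
    = ((PySem.Str.split? s ",").getD []).foldl pvStep (pvD false false false false false false) from rfl]
  rw [fold_eq]
  simp

lemma tokens_map (s : String) :
    ((PySem.Str.split? s ",").getD []).map String.toList = PySem.Chars.splitOn s.toList [','] := by
  have h := PySem.Str.split?_map s ","
  rw [PySem.Chars.split?, if_neg (by decide)] at h
  rcases Option.map_eq_some_iff.mp h with ⟨l, hl, hml⟩
  rw [hl]
  simpa using hml

lemma any_token (kw s : String) (hne : kw.toList ≠ []) (hc : (',' : Char) ∉ kw.toList)
    (hw : ∀ x ∈ kw.toList, PySem.Chars.isspace x = false) :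
    ((PySem.Str.split? s ",").getD []).any (fun t => PySem.Str.isIn kw (PySem.Str.strip t))
      = PySem.Str.isIn kw s := by
  have : ((PySem.Str.split? s ",").getD []).any (fun t => PySem.Str.isIn kw (PySem.Str.strip t))
      = (((PySem.Str.split? s ",").getD []).map String.toList).any
          (fun tl => PySem.Chars.isIn kw.toList (PySem.Chars.strip tl)) := by
    rw [List.any_map]
    exact List.any_congr rfl (fun t => by simp [PySem.Str.isIn, Function.comp])
  rw [this, tokens_map, key_lemma kw.toList s.toList hne hc hw, PySem.Str.isIn]

lemma any_or_split (l : List String) (p q : String → Bool) :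
    l.any (fun t => p t || q t) = (l.any p || l.any q) := by
  induction l with
  | nil => simp
  | cons x xs ih => simp [List.any_cons, ih]; cases p x <;> cases q x <;> cases xs.any p <;> cases xs.any q <;> simp

lemma audio_pointwise (x : String) :
    (PySem.Str.isIn "Audio" x || PySem.Str.isIn "Audiobook" x) = PySem.Str.isIn "Audio" x := by
  cases h : PySem.Str.isIn "Audiobook" x with
  | false => simp
  | true =>
    rw [PySem.Str.isIn] at h ⊢
    rw [PySem.Chars.isIn_iff_infix] at h
    have : ("Audio".toList) <+: ("Audiobook".toList) := by decide
    rw [(PySem.Chars.isIn_iff_infix _ _).mpr (this.isInfix.trans h)]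
    simp

lemma alt_eq (s : String) : process_formats_alt s =
    (pvD (PySem.Str.isIn "Hardcover" s) (PySem.Str.isIn "Paperback" s)
         (PySem.Str.isIn "Kindle" s || PySem.Str.isIn "eBook" s)
         (PySem.Str.isIn "Audio" s) (PySem.Str.isIn "Movie" s)
         (PySem.Str.isIn "TV" s || PySem.Str.isIn "Miniseries" s)).items := by
  simp [process_formats_alt, pvD, pvV]

set_option maxRecDepth 4096 in
theorem pv_main : ∀ (s : String), process_formats s = process_formats_alt s := by
  intro s
  by_cases h : s = ""
  · subst h; decide
  · rw [process_formats_ne s h, alt_eq]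
    rw [any_token "Hardcover" s (by decide) (by decide) (by simp [PySem.Chars.isspace])]
    rw [any_token "Paperback" s (by decide) (by decide) (by simp [PySem.Chars.isspace])]
    rw [any_or_split, any_or_split, any_or_split]
    rw [any_token "Kindle" s (by decide) (by decide) (by simp [PySem.Chars.isspace])]
    rw [any_token "eBook" s (by decide) (by decide) (by simp [PySem.Chars.isspace])]
    rw [any_token "Audio" s (by decide) (by decide) (by simp [PySem.Chars.isspace])]
    rw [any_token "Audiobook" s (by decide) (by decide) (by simp [PySem.Chars.isspace])]
    rw [any_token "Movie" s (by decide) (by decide) (by simp [PySem.Chars.isspace])]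
    rw [any_token "TV" s (by decide) (by decide) (by simp [PySem.Chars.isspace])]
    rw [any_token "Miniseries" s (by decide) (by decide) (by simp [PySem.Chars.isspace])]
    rw [audio_pointwise]

-- ===== VERDICT (by name: the statement is the Claim_ definition above) =====
theorem process_formats_spec : Claim_equal_process_formats := by
  intro s _
  unfold Spec_process_formats
  exact pv_main s
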